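-- pv_equiv track=rewrite | github.com/BABIN-JOE/Healynx | backend/app/services/minio_service.py | is_allowed_object_key
-- ===== SOURCE A (Python) =====
-- def is_allowed_object_key(object_name: str, hospital_id: str = None, patient_id: str = None) -> bool:
--     if not object_name or ".." in object_name:
--         return False
--
--     expected_parts = [part for part in (str(hospital_id or ""), str(patient_id or "")) if part]
--     object_parts = object_name.split("/")
--
--     if len(object_parts) < len(expected_parts) + 2:
--         return False
--
--     return object_parts[: len(expected_parts)] == expected_parts
-- ===== SOURCE B (Python) =====
-- def is_allowed_object_key(object_name: str, hospital_id: str = None, patient_id: str = None) -> bool: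
--     if not object_name or ".." in object_name:
--         return False
--
--     prefix = ""
--     n = 0
--     for part in (str(hospital_id or ""), str(patient_id or "")):
--         if part:
--             if "/" in part:
--                 # an id containing '/' can never equal a single path segment
--                 return False
--             prefix += part + "/"
--             n += 1
--
--     return object_name.startswith(prefix) and object_name.count("/") >= n + 1
-- ===== Notes on version B (the rewrite author's own statement) =====
-- stated objective: idiomatic
-- what changed: B never materializes the segment list: instead of splitting object_name on the slash separator and comparing a slice of segments, it concatenates the ids each followed by a slash into one expected prefix (rejecting an id that itself contains the separator, which can never equal a single segment) and decides via a startswith test plus a slash count.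
import Mathlib
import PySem

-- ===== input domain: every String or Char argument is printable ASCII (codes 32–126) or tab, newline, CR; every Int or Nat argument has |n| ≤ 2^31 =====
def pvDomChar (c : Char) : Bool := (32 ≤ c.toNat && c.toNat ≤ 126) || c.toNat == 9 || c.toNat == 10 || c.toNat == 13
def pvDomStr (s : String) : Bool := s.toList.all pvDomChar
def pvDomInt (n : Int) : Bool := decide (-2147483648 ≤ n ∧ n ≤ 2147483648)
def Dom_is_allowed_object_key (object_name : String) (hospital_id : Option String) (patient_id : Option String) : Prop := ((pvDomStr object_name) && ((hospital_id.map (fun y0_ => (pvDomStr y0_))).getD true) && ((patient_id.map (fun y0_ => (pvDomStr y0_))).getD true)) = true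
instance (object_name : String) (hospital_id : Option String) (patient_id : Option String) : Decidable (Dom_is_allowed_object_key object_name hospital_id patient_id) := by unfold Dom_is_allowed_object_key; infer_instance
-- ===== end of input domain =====

-- B replaces the split-into-segments comparison by a joined id-prefix startswith test plus a
-- slash count, so no segment list is materialized (objective: idiomatic; speed not claimed).

-- ===== PORT A =====
def is_allowed_object_key (object_name : String) (hospital_id : Option String) (patient_id : Option String) : Bool :=
  if object_name == "" || PySem.Str.isIn ".." object_name then false
  else
    let expected_parts : List (List Char) :=
      ([(hospital_id.getD "").toList, (patient_id.getD "").toList]).filter (fun part => !part.isEmpty)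
    let object_parts : List (List Char) := PySem.Chars.splitOn object_name.toList ['/']
    if object_parts.length < expected_parts.length + 2 then false
    else object_parts.take expected_parts.length == expected_parts

-- ===== PORT B =====
-- the body of Source B's for-loop (with its early 'return False' as the none state)
def pvStep (st : Option (List Char × Nat)) (part : List Char) : Option (List Char × Nat) :=
  match st with
  | none => none
  | some (pre, n) =>
    if part.isEmpty then some (pre, n)
    else if PySem.Chars.isIn ['/'] part then none
    else some (pre ++ part ++ ['/'], n + 1)

def is_allowed_object_key_alt (object_name : String) (hospital_id : Option String) (patient_id : Option String) : Bool :=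
  if object_name == "" || PySem.Str.isIn ".." object_name then false
  else
    match ([(hospital_id.getD "").toList, (patient_id.getD "").toList]).foldl pvStep (some ([], 0)) with
    | none => false
    | some (pre, n) =>
      PySem.Chars.startswith object_name.toList pre
        && decide (PySem.Chars.count object_name.toList ['/'] ≥ n + 1)

-- ===== PRECONDITION & SPEC =====
def Spec_is_allowed_object_key (object_name : String) (hospital_id : Option String) (patient_id : Option String) (out : Bool) : Prop := out = is_allowed_object_key_alt object_name hospital_id patient_id
instance (object_name : String) (hospital_id : Option String) (patient_id : Option String) (out : Bool) : Decidable (Spec_is_allowed_object_key object_name hospital_id patient_id out) := by unfold Spec_is_allowed_object_key; infer_instance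

-- ===== CLAIM (what is proved, stated in full; the proofs are below) =====
def Claim_equal_is_allowed_object_key : Prop := ∀ (object_name : String) (hospital_id : Option String) (patient_id : Option String), Dom_is_allowed_object_key object_name hospital_id patient_id → Spec_is_allowed_object_key object_name hospital_id patient_id (is_allowed_object_key object_name hospital_id patient_id)

-- ===== LEMMAS AND PROOFS =====

-- reference single-char split: (first segment, remaining segments)
def pvSeg : List Char → List Char × List (List Char)
  | [] => ([], [])
  | c :: rest => if c = '/' then ([], (pvSeg rest).1 :: (pvSeg rest).2)
                 else (c :: (pvSeg rest).1, (pvSeg rest).2)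

theorem splitOn_go_eq (fuel : Nat) : ∀ (l cur : List Char) (acc : List (List Char)),
    l.length ≤ fuel →
    PySem.Chars.splitOn.go ['/'] fuel l cur acc
      = acc.reverse ++ (cur.reverse ++ (pvSeg l).1) :: (pvSeg l).2 := by
  induction fuel with
  | zero =>
    intro l cur acc h
    have : l = [] := List.eq_nil_of_length_eq_zero (Nat.le_zero.mp h)
    subst this
    simp [PySem.Chars.splitOn.go, pvSeg]
  | succ n ih =>
    intro l cur acc h
    cases l with
    | nil => simp [PySem.Chars.splitOn.go, pvSeg]
    | cons c rest =>
      simp only [PySem.Chars.splitOn.go]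
      by_cases hc : c = '/'
      · subst hc
        have hpre : List.isPrefixOf ['/'] ('/' :: rest) = true := by
          simp [List.isPrefixOf]
        rw [if_pos hpre]
        simp only [List.length_cons] at h
        rw [ih _ _ _ (by simpa using Nat.le_of_succ_le_succ h)]
        simp [pvSeg]
      · have hpre : List.isPrefixOf ['/'] (c :: rest) = false := by
          simp only [List.isPrefixOf, Bool.and_eq_false_iff, beq_eq_false_iff_ne]
          exact Or.inl (Ne.symm hc)
        rw [if_neg (by simp [hpre])]
        simp only [List.length_cons] at h
        rw [ih _ _ _ (Nat.le_of_succ_le_succ h)]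
        simp [pvSeg, hc]

theorem splitOn_eq (cs : List Char) :
    PySem.Chars.splitOn cs ['/'] = (pvSeg cs).1 :: (pvSeg cs).2 := by
  unfold PySem.Chars.splitOn
  rw [splitOn_go_eq (cs.length + 1) cs [] [] (Nat.le_succ _)]
  simp

theorem count_go_eq (fuel : Nat) : ∀ (l : List Char) (acc : Nat),
    l.length ≤ fuel →
    PySem.Chars.count.go ['/'] fuel l acc = acc + (pvSeg l).2.length := by
  induction fuel with
  | zero =>
    intro l acc h
    have : l = [] := List.eq_nil_of_length_eq_zero (Nat.le_zero.mp h)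
    subst this
    simp [PySem.Chars.count.go, pvSeg]
  | succ n ih =>
    intro l acc h
    cases l with
    | nil => simp [PySem.Chars.count.go, pvSeg]
    | cons c rest =>
      simp only [PySem.Chars.count.go]
      simp only [List.length_cons] at h
      by_cases hc : c = '/'
      · subst hc
        have hpre : List.isPrefixOf ['/'] ('/' :: rest) = true := by
          simp [List.isPrefixOf]
        rw [if_pos hpre]
        rw [ih _ _ (by simpa using Nat.le_of_succ_le_succ h)]
        simp [pvSeg]; omega
      · have hpre : List.isPrefixOf ['/'] (c :: rest) = false := by
          simp only [List.isPrefixOf, Bool.and_eq_false_iff, beq_eq_false_iff_ne]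
          exact Or.inl (Ne.symm hc)
        rw [if_neg (by simp [hpre])]
        rw [ih _ _ (Nat.le_of_succ_le_succ h)]
        simp [pvSeg, hc]

theorem count_eq_segs (cs : List Char) :
    PySem.Chars.count cs ['/'] = (pvSeg cs).2.length := by
  unfold PySem.Chars.count
  simp [count_go_eq cs.length cs 0 (le_refl _)]

theorem pvSeg_fst_no_slash (cs : List Char) : '/' ∉ (pvSeg cs).1 := by
  induction cs with
  | nil => simp [pvSeg]
  | cons c rest ih =>
    by_cases hc : c = '/'
    · subst hc; simp [pvSeg]
    · simp only [pvSeg, if_neg hc, List.mem_cons, not_or]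
      exact ⟨fun h1 => hc h1.symm, ih⟩

theorem pvSeg_mem_no_slash (cs : List Char) :
    ∀ q ∈ (pvSeg cs).1 :: (pvSeg cs).2, '/' ∉ q := by
  induction cs with
  | nil => simp [pvSeg]
  | cons c rest ih =>
    by_cases hc : c = '/'
    · subst hc
      intro q hq
      simp only [pvSeg, if_pos rfl] at hq
      simp at hq
      rcases hq with h | h | h
      · subst h; simp
      · exact ih _ (by simp [h])
      · exact ih _ (by simp [h])
    · intro q hq
      simp only [pvSeg, if_neg hc] at hq
      simp at hq
      rcases hq with h | h
      · subst h
        simp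
        constructor
        · exact fun h => hc h.symm
        · exact pvSeg_fst_no_slash rest
      · exact ih _ (by simp [h])

-- decomposition: if there is more than one segment, cs = firstSeg ++ '/' :: rest
theorem pvSeg_decomp (cs : List Char) (h : (pvSeg cs).2 ≠ []) :
    ∃ rest, cs = (pvSeg cs).1 ++ '/' :: rest ∧
      (pvSeg rest).1 :: (pvSeg rest).2 = (pvSeg cs).2 := by
  induction cs with
  | nil => simp [pvSeg] at h
  | cons c rest ih =>
    by_cases hc : c = '/'
    · subst hc
      refine ⟨rest, ?_, ?_⟩ <;> simp [pvSeg]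
    · simp only [pvSeg, if_neg hc] at h ⊢
      obtain ⟨r, hr, hs⟩ := ih h
      exact ⟨r, by rw [List.cons_append, ← hr], hs⟩

-- two slash-free prefixes before a '/' are equal
theorem slashfree_prefix_eq (p : List Char) : ∀ (q u v : List Char), '/' ∉ p → '/' ∉ q →
    (p ++ '/' :: u) <+: (q ++ '/' :: v) → p = q ∧ u <+: v := by
  induction p with
  | nil =>
    intro q u v _ hq hpre
    cases q with
    | nil => simpa using hpre
    | cons b q' =>
      exfalso
      rw [List.nil_append, List.cons_append, List.cons_prefix_cons] at hpre
      exact hq (by rw [hpre.1]; simp)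
  | cons a p' ih =>
    intro q u v hp hq hpre
    cases q with
    | nil =>
      exfalso
      rw [List.nil_append, List.cons_append, List.cons_prefix_cons] at hpre
      exact hp (by rw [← hpre.1]; simp)
    | cons b q' =>
      simp only [List.cons_append] at hpre
      rw [List.cons_prefix_cons] at hpre
      obtain ⟨hab, hpre'⟩ := hpre
      subst hab
      have hp' : '/' ∉ p' := fun h => hp (by simp [h])
      have hq' : '/' ∉ q' := fun h => hq (by simp [h])
      obtain ⟨h1, h2⟩ := ih q' u v hp' hq' hpre'
      exact ⟨by rw [h1], h2⟩

-- the flattened "part/part/…/" prefix B builds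
def pvFlat (es : List (List Char)) : List Char := (es.map (fun p => p ++ ['/'])).flatten

theorem main_iff (es : List (List Char)) : ∀ (cs : List Char),
    (∀ p ∈ es, '/' ∉ p) →
    es.length + 2 ≤ ((pvSeg cs).1 :: (pvSeg cs).2).length →
    (((pvSeg cs).1 :: (pvSeg cs).2).take es.length = es ↔ pvFlat es <+: cs) := by
  induction es with
  | nil => intro cs _ _; simp [pvFlat]
  | cons p es' ih =>
    intro cs hsf hlen
    simp only [List.length_cons] at hlen
    have h2 : (pvSeg cs).2 ≠ [] := by
      intro h; rw [h] at hlen; simp at hlen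
    obtain ⟨rest, hdec, hsegs⟩ := pvSeg_decomp cs h2
    have hlenr : es'.length + 2 ≤ ((pvSeg rest).1 :: (pvSeg rest).2).length := by
      rw [hsegs]; omega
    have hsf' : ∀ q ∈ es', '/' ∉ q := fun q hq => hsf q (by simp [hq])
    have hp : '/' ∉ p := hsf p (by simp)
    have ihr := ih rest hsf' hlenr
    constructor
    · intro h
      simp only [List.length_cons, List.take_succ_cons, List.cons.injEq] at h
      obtain ⟨h1, htail⟩ := h
      rw [← hsegs] at htail
      simp only [pvFlat, List.map_cons, List.flatten_cons]
      rw [hdec, h1]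
      have : pvFlat es' <+: rest := ihr.mp htail
      obtain ⟨t, ht⟩ := this
      exact ⟨t, by simp [← ht, pvFlat]⟩
    · intro h
      simp only [pvFlat, List.map_cons, List.flatten_cons] at h
      rw [hdec] at h
      have h' : (p ++ '/' :: pvFlat es') <+: ((pvSeg cs).1 ++ '/' :: rest) := by
        simpa using h
      obtain ⟨heq, hrest⟩ :=
        slashfree_prefix_eq p (pvSeg cs).1 (pvFlat es') rest hp (pvSeg_fst_no_slash cs) h'
      simp only [List.length_cons, List.take_succ_cons, List.cons.injEq]
      refine ⟨heq.symm, ?_⟩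
      rw [← hsegs]
      exact ihr.mpr hrest

-- core: for a concrete list of slash-free expected parts, A's check equals B's check
theorem core_eq (cs : List Char) (es : List (List Char)) (hsf : ∀ p ∈ es, '/' ∉ p) :
    (if (PySem.Chars.splitOn cs ['/']).length < es.length + 2 then false
     else (PySem.Chars.splitOn cs ['/']).take es.length == es)
    = (PySem.Chars.startswith cs (pvFlat es)
        && decide (PySem.Chars.count cs ['/'] ≥ es.length + 1)) := by
  rw [splitOn_eq, count_eq_segs]
  by_cases hlen : ((pvSeg cs).1 :: (pvSeg cs).2).length < es.length + 2
  · rw [if_pos hlen]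
    have : ¬ (pvSeg cs).2.length ≥ es.length + 1 := by
      simp only [List.length_cons] at hlen; omega
    simp [this]
  · rw [if_neg hlen]
    push_neg at hlen
    have hcount : (pvSeg cs).2.length ≥ es.length + 1 := by
      simp only [List.length_cons] at hlen; omega
    have hiff := main_iff es cs hsf hlen
    simp only [hcount, decide_true, Bool.and_true, PySem.Chars.startswith]
    rw [Bool.eq_iff_iff]
    simp only [beq_iff_eq, List.isPrefixOf_iff_prefix, ge_iff_le, le_refl, decide_true,
      Bool.and_true]
    exact hiff

-- a check that fails when a part contains '/': A's comparison can never succeed either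
theorem core_slash_false (cs : List Char) (es : List (List Char)) (p : List Char)
    (hmem : p ∈ es) (hp : '/' ∈ p) :
    (if (PySem.Chars.splitOn cs ['/']).length < es.length + 2 then false
     else (PySem.Chars.splitOn cs ['/']).take es.length == es) = false := by
  rw [splitOn_eq]
  by_cases hlen : ((pvSeg cs).1 :: (pvSeg cs).2).length < es.length + 2
  · rw [if_pos hlen]
  · rw [if_neg hlen]
    push_neg at hlen
    rw [beq_eq_false_iff_ne]
    intro heq
    have : p ∈ ((pvSeg cs).1 :: (pvSeg cs).2).take es.length := by rw [heq]; exact hmem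
    have : p ∈ ((pvSeg cs).1 :: (pvSeg cs).2) := List.mem_of_mem_take this
    exact pvSeg_mem_no_slash cs p this hp

theorem isIn_slash_iff (p : List Char) : PySem.Chars.isIn ['/'] p = true ↔ '/' ∈ p := by
  rw [PySem.Chars.isIn_iff_infix]
  constructor
  · rintro ⟨u, v, huv⟩
    rw [← huv]; simp
  · intro h
    obtain ⟨u, v, huv⟩ := List.append_of_mem h
    exact ⟨u, v, by simp [huv]⟩

-- pvStep reduction lemmas
theorem pvStep_none (part : List Char) : pvStep none part = none := rfl

theorem pvStep_empty (pre : List Char) (n : Nat) (part : List Char) (h : part.isEmpty = true) :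
    pvStep (some (pre, n)) part = some (pre, n) := by simp [pvStep, h]

theorem pvStep_slash (pre : List Char) (n : Nat) (part : List Char)
    (h1 : part.isEmpty = false) (h2 : PySem.Chars.isIn ['/'] part = true) :
    pvStep (some (pre, n)) part = none := by simp [pvStep, h1, h2]

theorem pvStep_ok (pre : List Char) (n : Nat) (part : List Char)
    (h1 : part.isEmpty = false) (h2 : PySem.Chars.isIn ['/'] part = false) :
    pvStep (some (pre, n)) part = some (pre ++ part ++ ['/'], n + 1) := by
  simp [pvStep, h1, h2]

-- ===== VERDICT (by name: the statement is the Claim_ definition above) =====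
theorem is_allowed_object_key_spec : Claim_equal_is_allowed_object_key := by
  intro object_name hospital_id patient_id _
  unfold Spec_is_allowed_object_key is_allowed_object_key is_allowed_object_key_alt
  by_cases hguard : (object_name == "" || PySem.Str.isIn ".." object_name) = true
  · rw [if_pos hguard, if_pos hguard]
  · rw [if_neg hguard, if_neg hguard]
    set cs := object_name.toList with hcs
    set hs := (hospital_id.getD "").toList with hhs
    set ps := (patient_id.getD "").toList with hps
    rw [List.foldl_cons, List.foldl_cons, List.foldl_nil]
    by_cases hhe : hs.isEmpty = true
    · rw [pvStep_empty _ _ _ hhe]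
      by_cases hpe : ps.isEmpty = true
      · rw [pvStep_empty _ _ _ hpe]
        simpa [pvFlat, List.filter_cons, hhe, hpe] using core_eq cs [] (by simp)
      · rw [Bool.not_eq_true] at hpe
        by_cases hpsl : PySem.Chars.isIn ['/'] ps = true
        · rw [pvStep_slash _ _ _ hpe hpsl]
          simpa [List.filter_cons, hhe, hpe] using
            core_slash_false cs [ps] ps (by simp) ((isIn_slash_iff ps).mp hpsl)
        · rw [Bool.not_eq_true] at hpsl
          rw [pvStep_ok _ _ _ hpe hpsl]
          have hnp : '/' ∉ ps := fun h => by
            rw [(isIn_slash_iff ps).mpr h] at hpsl; exact Bool.true_eq_false.mp hpsl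
          simpa [pvFlat, List.filter_cons, hhe, hpe] using core_eq cs [ps] (by simpa using hnp)
    · rw [Bool.not_eq_true] at hhe
      by_cases hhsl : PySem.Chars.isIn ['/'] hs = true
      · rw [pvStep_slash _ _ _ hhe hhsl, pvStep_none]
        have hmem : '/' ∈ hs := (isIn_slash_iff hs).mp hhsl
        by_cases hpe : ps.isEmpty = true
        · simpa [List.filter_cons, hhe, hpe] using core_slash_false cs [hs] hs (by simp) hmem
        · rw [Bool.not_eq_true] at hpe
          simpa [List.filter_cons, hhe, hpe] using
            core_slash_false cs [hs, ps] hs (by simp) hmem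
      · rw [Bool.not_eq_true] at hhsl
        have hnh : '/' ∉ hs := fun h => by
          rw [(isIn_slash_iff hs).mpr h] at hhsl; exact Bool.true_eq_false.mp hhsl
        rw [pvStep_ok _ _ _ hhe hhsl]
        by_cases hpe : ps.isEmpty = true
        · rw [pvStep_empty _ _ _ hpe]
          simpa [pvFlat, List.filter_cons, hhe, hpe] using core_eq cs [hs] (by simpa using hnh)
        · rw [Bool.not_eq_true] at hpe
          by_cases hpsl : PySem.Chars.isIn ['/'] ps = true
          · rw [pvStep_slash _ _ _ hpe hpsl]
            simpa [List.filter_cons, hhe, hpe] using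
              core_slash_false cs [hs, ps] ps (by simp) ((isIn_slash_iff ps).mp hpsl)
          · rw [Bool.not_eq_true] at hpsl
            rw [pvStep_ok _ _ _ hpe hpsl]
            have hnp : '/' ∉ ps := fun h => by
              rw [(isIn_slash_iff ps).mpr h] at hpsl; exact Bool.true_eq_false.mp hpsl
            have hsf : ∀ q ∈ [hs, ps], '/' ∉ q := by
              intro q hq
              rcases List.mem_cons.mp hq with h | h
              · subst h; exact hnh
              · rw [List.mem_singleton.mp h]; exact hnp
            simpa [pvFlat, List.filter_cons, hhe, hpe] using core_eq cs [hs, ps] hsf
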